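-- pv_equiv track=rewrite | github.com/jcontreras29/Pickomino | pickomino1v1.py | bustCheck
-- ===== SOURCE A (Python) =====
-- def bustCheck(rolled, kept):
--     total = 0
--     amount = len(rolled)
--     for i in rolled:
--         if (i in kept):
--             total += 1
--     if (total == amount):
--         return True
--     else:
--         return False
-- ===== SOURCE B (Python) =====
-- def bustCheck(rolled, kept):
--     r = sorted(set(rolled))
--     k = sorted(set(kept))
--     j = 0
--     for v in r:
--         while j < len(k) and k[j] < v:
--             j += 1
--         if j == len(k) or k[j] != v:
--             return False
--     return True
-- ===== Notes on version B (the rewrite author's own statement) =====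
-- stated objective: faster
-- what changed: A counts, with a nested membership scan of kept per rolled element, how many rolled values occur in kept and compares the counter to len(rolled); B sorts the distinct values of each list once and runs a single two-pointer merge scan over the two sorted sequences, returning False at the first rolled value the scan cannot find.
import Mathlib
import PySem

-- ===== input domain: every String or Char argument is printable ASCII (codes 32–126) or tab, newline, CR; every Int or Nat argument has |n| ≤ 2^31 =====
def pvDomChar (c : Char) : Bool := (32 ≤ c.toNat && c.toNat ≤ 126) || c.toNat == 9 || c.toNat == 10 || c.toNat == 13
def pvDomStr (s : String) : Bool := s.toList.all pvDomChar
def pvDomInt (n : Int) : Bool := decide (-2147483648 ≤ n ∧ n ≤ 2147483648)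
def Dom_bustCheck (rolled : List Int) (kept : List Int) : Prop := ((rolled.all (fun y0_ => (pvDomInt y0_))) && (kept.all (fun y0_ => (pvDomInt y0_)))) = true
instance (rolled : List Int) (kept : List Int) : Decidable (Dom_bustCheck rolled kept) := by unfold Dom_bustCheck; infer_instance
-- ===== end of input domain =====

-- B replaces A's nested membership-scan counting loop by a sort-then-merge scan over the distinct values; return values proved equal on all inputs.


-- ===== PORT A =====
def bustCheck (rolled : List Int) (kept : List Int) : Bool :=
  let total : Int := 0
  let amount : Int := rolled.length
  let total := rolled.foldl (fun total i => if kept.contains i then total + 1 else total) total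
  if total = amount then true else false

-- ===== PORT B =====
-- the for-v/inner-while loop of Source B: advancing j = dropping the head of k (w < v);
-- moving to the next v with j unchanged (w == v); k exhausted or k[j] > v = return False
def pvMergeSub : List Int → List Int → Bool
  | [], _ => true
  | _ :: _, [] => false
  | v :: r, w :: k =>
      if w < v then pvMergeSub (v :: r) k
      else if w == v then pvMergeSub r (w :: k)
      else false
termination_by r k => (r.length, k.length)

def bustCheck_alt (rolled : List Int) (kept : List Int) : Bool :=
  pvMergeSub (PySem.List.sorted (PySem.Set.ofList rolled) (fun x => x) false)
             (PySem.List.sorted (PySem.Set.ofList kept) (fun x => x) false)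

-- ===== PRECONDITION & SPEC =====
def Spec_bustCheck (rolled : List Int) (kept : List Int) (out : Bool) : Prop := out = bustCheck_alt rolled kept
instance (rolled : List Int) (kept : List Int) (out : Bool) : Decidable (Spec_bustCheck rolled kept out) := by unfold Spec_bustCheck; infer_instance

-- ===== CLAIM (what is proved, stated in full; the proofs are below) =====
def Claim_equal_bustCheck : Prop := ∀ (rolled : List Int) (kept : List Int), Dom_bustCheck rolled kept → Spec_bustCheck rolled kept (bustCheck rolled kept)

-- ===== LEMMAS AND PROOFS =====
theorem bustCheck_foldl_count (kept : List Int) (rolled : List Int) (c : Int) :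
    rolled.foldl (fun total i => if kept.contains i then total + 1 else total) c
      = c + (rolled.countP (fun i => kept.contains i) : Int) := by
  induction rolled generalizing c with
  | nil => simp
  | cons x xs ih =>
      rw [List.foldl_cons, List.countP_cons, ih]
      by_cases h : kept.contains x = true
      · rw [if_pos h, if_pos h]; push_cast; ring
      · rw [if_neg h, if_neg h]; push_cast; ring

theorem pvMergeSub_iff (r k : List Int) (hr : r.Pairwise (· < ·)) (hk : k.Pairwise (· < ·)) :
    pvMergeSub r k = true ↔ ∀ x ∈ r, x ∈ k := by
  induction r, k using pvMergeSub.induct with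
  | case1 k => simp [pvMergeSub]
  | case2 v r =>
      simp only [pvMergeSub, Bool.false_eq_true, false_iff]
      intro h
      exact absurd (h v List.mem_cons_self) (List.not_mem_nil)
  | case3 v r w k hlt ih =>
      rw [pvMergeSub, if_pos hlt, ih hr hk.tail]
      constructor
      · intro h x hx
        exact List.mem_cons_of_mem w (h x hx)
      · intro h x hx
        rcases List.mem_cons.mp (h x hx) with rfl | hx'
        · -- x = w, but x ≥ v > w
          rcases List.mem_cons.mp hx with rfl | hx''
          · omega
          · have := (List.pairwise_cons.mp hr).1 x hx''
            omega
        · exact hx'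
  | case4 v r w k hlt heq ih =>
      have hw : w = v := by simpa using heq
      subst hw
      rw [pvMergeSub, if_neg hlt, if_pos heq, ih hr.tail hk]
      constructor
      · intro h x hx
        rcases List.mem_cons.mp hx with rfl | hx'
        · exact List.mem_cons_self
        · exact h x hx'
      · intro h x hx
        exact h x (List.mem_cons_of_mem w hx)
  | case5 v r w k hlt hne =>
      rw [pvMergeSub, if_neg hlt, if_neg hne]
      have hnot : ¬ ∀ x ∈ v :: r, x ∈ w :: k := by
        intro h
        have hv := h v List.mem_cons_self
        rcases List.mem_cons.mp hv with h1 | h2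
        · exact hne (by simpa using h1.symm)
        · have := (List.pairwise_cons.mp hk).1 v h2
          omega
      exact iff_of_false (by simp) hnot

theorem bustCheck_alt_iff (rolled kept : List Int) :
    bustCheck_alt rolled kept = true ↔ ∀ x ∈ rolled, x ∈ kept := by
  unfold bustCheck_alt
  rw [pvMergeSub_iff _ _ (PySem.List.sorted_ofList_pairwise_lt rolled)
        (PySem.List.sorted_ofList_pairwise_lt kept)]
  constructor
  · intro h x hx
    have := h x (by rw [PySem.List.mem_sorted, PySem.Set.mem_ofList]; exact hx)
    rwa [PySem.List.mem_sorted, PySem.Set.mem_ofList] at this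
  · intro h x hx
    rw [PySem.List.mem_sorted, PySem.Set.mem_ofList] at hx
    rw [PySem.List.mem_sorted, PySem.Set.mem_ofList]
    exact h x hx

-- ===== VERDICT (by name: the statement is the Claim_ definition above) =====
theorem bustCheck_spec : Claim_equal_bustCheck := by
  intro rolled kept _
  unfold Spec_bustCheck bustCheck
  simp only [bustCheck_foldl_count, zero_add]
  rcases h : bustCheck_alt rolled kept with _ | _
  · have hne : ¬ ∀ x ∈ rolled, x ∈ kept := by
      intro hall
      have := (bustCheck_alt_iff rolled kept).mpr hall
      simp [this] at h
    have hlt : rolled.countP (fun i => kept.contains i) < rolled.length := by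
      rcases lt_or_eq_of_le (List.countP_le_length (l := rolled) (p := fun i => kept.contains i)) with h' | h'
      · exact h'
      · exact absurd (fun x hx => by simpa using (List.countP_eq_length.mp h') x hx) hne
    rw [if_neg (by omega)]
  · have hall := (bustCheck_alt_iff rolled kept).mp h
    have hc : rolled.countP (fun i => kept.contains i) = rolled.length :=
      List.countP_eq_length.mpr (fun x hx => by simpa using hall x hx)
    rw [hc, if_pos rfl]
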